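-- pv_equiv track=rewrite | github.com/AsafAaronson/Sudoku_Solver | soduku_solver_back/Board.py | num_counter
-- ===== SOURCE A (Python) =====
-- def num_counter(sets):
--     num_quantities = {}
--     for i in range(1, 10):
--         count = 0
--         for t in sets:
--             if i in sets[t]:
--                 count += 1
--         num_quantities[i] = count
--     return num_quantities
-- ===== SOURCE B (Python) =====
-- def num_counter(sets):
--     num_quantities = {i: 0 for i in range(1, 10)}
--     for vals in sets.values():
--         for v in set(vals):
--             if v in num_quantities:
--                 num_quantities[v] += 1
--     return num_quantities
-- ===== Notes on version B (the rewrite author's own statement) =====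
-- stated objective: simpler
-- what changed: Replaces the nine separate digit-by-set membership scans with a pre-seeded 1-9 frequency table filled in a single pass that tallies the distinct values of each set.
import Mathlib
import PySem

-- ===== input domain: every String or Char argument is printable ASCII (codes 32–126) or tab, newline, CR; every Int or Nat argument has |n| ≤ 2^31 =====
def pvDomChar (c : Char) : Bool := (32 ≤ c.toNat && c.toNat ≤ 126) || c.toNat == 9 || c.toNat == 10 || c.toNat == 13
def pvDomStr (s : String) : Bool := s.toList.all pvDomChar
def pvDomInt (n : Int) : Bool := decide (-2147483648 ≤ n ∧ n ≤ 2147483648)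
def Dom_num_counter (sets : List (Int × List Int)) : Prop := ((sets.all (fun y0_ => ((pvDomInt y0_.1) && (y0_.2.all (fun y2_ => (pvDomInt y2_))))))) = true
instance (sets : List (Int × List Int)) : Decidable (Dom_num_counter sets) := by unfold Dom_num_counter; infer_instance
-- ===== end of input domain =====

-- B replaces A's nine digit-by-set membership scans with a single pass tallying each
-- set's distinct values into a pre-seeded 1..9 frequency table (objective: simpler).

-- ===== PORT A =====
def num_counter (sets : List (Int × List Int)) : List (Int × Int) :=
  let setsD := PySem.Dict.ofList sets
  ((PySem.List.pyRange 1 10 1).foldl (fun nq i =>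
      let count : Int :=
        setsD.keys.foldl (fun c t => if i ∈ setsD.getD t [] then c + 1 else c) 0
      nq.insert i count) (PySem.Dict.empty : PySem.Dict Int Int)).items

-- ===== PORT B =====
def num_counter_alt (sets : List (Int × List Int)) : List (Int × Int) :=
  let setsD := PySem.Dict.ofList sets
  let init : PySem.Dict Int Int :=
    (PySem.List.pyRange 1 10 1).foldl (fun nq i => nq.insert i 0) PySem.Dict.empty
  (setsD.values.foldl (fun nq vals =>
      (PySem.Set.ofList vals).foldl (fun nq v =>
        if nq.contains v then nq.modify v 0 (· + 1) else nq) nq) init).items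

-- ===== PRECONDITION & SPEC =====
def Spec_num_counter (sets : List (Int × List Int)) (out : List (Int × Int)) : Prop := out = num_counter_alt sets
instance (sets : List (Int × List Int)) (out : List (Int × Int)) : Decidable (Spec_num_counter sets out) := by unfold Spec_num_counter; infer_instance

-- ===== CLAIM (what is proved, stated in full; the proofs are below) =====
def Claim_equal_num_counter : Prop := ∀ (sets : List (Int × List Int)), Dom_num_counter sets → Spec_num_counter sets (num_counter sets)

-- ===== LEMMAS AND PROOFS =====

-- the digits 1..9
def pvDigs : List Int := [1, 2, 3, 4, 5, 6, 7, 8, 9]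

theorem pvRange_eq : PySem.List.pyRange 1 10 1 = pvDigs := by decide

-- A's inner counting loop is countP
theorem foldl_count_eq {α : Type} (p : α → Prop) [DecidablePred p] :
    ∀ (l : List α) (c : Int),
      l.foldl (fun c t => if p t then c + 1 else c) c
        = c + (l.countP (fun t => decide (p t)) : Int) := by
  intro l
  induction l with
  | nil => intro c; simp
  | cons a l ih =>
    intro c
    simp only [List.foldl_cons, List.countP_cons, ih]
    by_cases h : p a <;> simp [h] <;> push_cast <;> ring

-- one stepped increment pass over a Nodup list S maps the items pointwise
theorem step_items (S : List Int) (hS : S.Nodup) :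
    ∀ (nq : PySem.Dict Int Int), nq.keys.Nodup →
      (S.foldl (fun nq v => if nq.contains v then nq.modify v 0 (· + 1) else nq) nq).items
        = nq.items.map (fun p => if p.1 ∈ S then (p.1, p.2 + 1) else p) := by
  induction S with
  | nil => intro nq _; simp
  | cons v S ih =>
    intro nq hk
    have hvS : v ∉ S := (List.nodup_cons.mp hS).1
    have hS' : S.Nodup := (List.nodup_cons.mp hS).2
    -- items of the single step at v
    have hstep : (if nq.contains v then nq.modify v 0 (· + 1) else nq).items
        = nq.items.map (fun p => if p.1 = v then (p.1, p.2 + 1) else p) := by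
      by_cases hc : nq.contains v = true
      · simp only [hc, if_true, PySem.Dict.modify, PySem.Dict.insert, hc]
        apply List.map_congr_left
        intro p hp
        by_cases hpv : p.1 = v
        · have : nq.getD v 0 = p.2 := by
            have : (p.1, p.2) ∈ nq.items := by simpa using hp
            rw [hpv] at this
            exact PySem.Dict.getD_of_mem_items _ this hk 0
          simp [hpv, this]
        · simp [hpv]
      · have hc' : nq.contains v = false := by simpa using hc
        rw [if_neg hc]
        have hkeys : v ∉ nq.keys := by
          intro hmem
          have := (PySem.Dict.contains_iff_mem_keys (d := nq) (k := v)).mpr hmem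
          rw [hc'] at this; exact Bool.false_ne_true this
        have hmapid : nq.items.map (fun p => if p.1 = v then (p.1, p.2 + 1) else p)
            = nq.items.map id := by
          apply List.map_congr_left
          intro p hp
          have hne : p.1 ≠ v := by
            intro h
            exact hkeys (h ▸ (PySem.Dict.mem_keys_of_mem_items _ hp))
          simp [hne]
        rw [hmapid, List.map_id]
    -- keys of the stepped dict are nq's keys
    have hkeys_step : (if nq.contains v then nq.modify v 0 (· + 1) else nq).keys = nq.keys := by
      show ((if nq.contains v then nq.modify v 0 (· + 1) else nq).items.map Prod.fst) = nq.items.map Prod.fst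
      rw [hstep, List.map_map]
      apply List.map_congr_left
      intro p _
      by_cases hpv : p.1 = v <;> simp [hpv]
    simp only [List.foldl_cons]
    rw [ih hS' _ (by rw [hkeys_step]; exact hk), hstep, List.map_map]
    apply List.map_congr_left
    intro p _
    by_cases hpv : p.1 = v
    · simp [hpv, hvS]
    · by_cases hps : p.1 ∈ S <;> simp [hpv, hps]

-- B's outer loop accumulates per-digit counts over the list of value lists
theorem loopB (L : List (List Int)) :
    ∀ (g : Int → Int) (nq : PySem.Dict Int Int),
      nq.items = pvDigs.map (fun i => (i, g i)) →
      (L.foldl (fun nq vals =>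
          (PySem.Set.ofList vals).foldl (fun nq v =>
            if nq.contains v then nq.modify v 0 (· + 1) else nq) nq) nq).items
        = pvDigs.map (fun i => (i, g i + (L.countP (fun vals => decide (i ∈ vals)) : Int))) := by
  induction L with
  | nil => intro g nq h; simpa using h
  | cons vals L ih =>
    intro g nq h
    have hk : nq.keys.Nodup := by
      have hkeq : nq.items.map Prod.fst = pvDigs := by
        rw [h, List.map_map]
        exact (List.map_congr_left (g := id) (fun a _ => rfl)).trans (List.map_id _)
      show (nq.items.map Prod.fst).Nodup
      rw [hkeq]; decide
    simp only [List.foldl_cons]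
    have hst := step_items (PySem.Set.ofList vals) (PySem.Set.nodup_ofList vals) nq hk
    rw [h, List.map_map] at hst
    have hst' : ((PySem.Set.ofList vals).foldl (fun nq v =>
          if nq.contains v then nq.modify v 0 (· + 1) else nq) nq).items
        = pvDigs.map (fun i => (i, g i + if i ∈ vals then 1 else 0)) := by
      rw [hst]
      apply List.map_congr_left
      intro i _
      by_cases hm : i ∈ vals
      · simp [Function.comp_def, hm, PySem.Set.mem_ofList]
      · simp [Function.comp_def, hm, PySem.Set.mem_ofList]
    rw [ih (fun i => g i + if i ∈ vals then 1 else 0) _ hst']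
    apply List.map_congr_left
    intro i _
    simp only [List.countP_cons]
    by_cases hm : i ∈ vals <;> simp [hm] <;> push_cast <;> ring

-- A's dict has a literal item list
theorem itemsA (f : Int → Int) :
    (pvDigs.foldl (fun nq i => nq.insert i (f i)) (PySem.Dict.empty : PySem.Dict Int Int)).items
      = pvDigs.map (fun i => (i, f i)) := by
  have := PySem.Dict.items_foldl_insert_fresh (l := pvDigs) (k := fun i => i) (v := f)
    (d := (PySem.Dict.empty : PySem.Dict Int Int)) (by intro a _; simp) (by decide)
  simpa using this

-- ===== VERDICT (by name: the statement is the Claim_ definition above) =====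
theorem num_counter_spec : Claim_equal_num_counter := by
  intro sets _
  unfold Spec_num_counter num_counter num_counter_alt
  rw [pvRange_eq]
  set d := PySem.Dict.ofList sets with hd
  have hnd : d.keys.Nodup := PySem.Dict.nodup_keys_ofList sets
  -- A's side
  rw [itemsA]
  -- B's side: init
  have hinit : (pvDigs.foldl (fun nq i => nq.insert i 0)
      (PySem.Dict.empty : PySem.Dict Int Int)).items
      = pvDigs.map (fun i => (i, (fun _ => (0 : Int)) i)) := itemsA (fun _ => 0)
  rw [loopB d.values (fun _ => 0) _ hinit]
  apply List.map_congr_left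
  intro i _
  rw [foldl_count_eq (fun t => i ∈ d.getD t [])]
  rw [PySem.Dict.values_eq_map_keys d hnd []]
  rw [List.countP_map]
  simp [Function.comp_def]
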